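-- pv_equiv track=rewrite | github.com/TienDat11102k5/UTH-ConfMS | UTH-ConfMS/ai-service/src/core/services/assignment_suggester.py | _calculate_workload
-- ===== SOURCE A (Python) =====
-- from typing import List, Dict, Optional, Set
--
-- def _calculate_workload(
--
--     reviewer_ids: List[str],
--     existing_assignments: List[Dict]
-- ) -> Dict[str, int]:
--     """Tính khối lượng công việc hiện tại cho mỗi người phản biện."""
--     workload = {rid: 0 for rid in reviewer_ids}
--
--     for assignment in existing_assignments:
--         reviewer_id = assignment.get("reviewer_id")
--         if reviewer_id in workload:
--             workload[reviewer_id] += 1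
--
--     return workload
-- ===== SOURCE B (Python) =====
-- from typing import List, Dict
--
-- def _calculate_workload(
--     reviewer_ids: List[str],
--     existing_assignments: List[Dict]
-- ) -> Dict[str, int]:
--     return {
--         rid: sum(1 for a in existing_assignments if a.get("reviewer_id") == rid)
--         for rid in reviewer_ids
--     }
-- ===== Notes on version B (the rewrite author's own statement) =====
-- stated objective: simpler
-- what changed: Replaces A's mutable-accumulator two-phase loop (init-to-zero pass plus an increment pass over assignments) with a single dict comprehension that, per reviewer id, counts matching assignments directly; loop nesting is inverted (reviewers outside, assignments rescanned inside).
import Mathlib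
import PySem

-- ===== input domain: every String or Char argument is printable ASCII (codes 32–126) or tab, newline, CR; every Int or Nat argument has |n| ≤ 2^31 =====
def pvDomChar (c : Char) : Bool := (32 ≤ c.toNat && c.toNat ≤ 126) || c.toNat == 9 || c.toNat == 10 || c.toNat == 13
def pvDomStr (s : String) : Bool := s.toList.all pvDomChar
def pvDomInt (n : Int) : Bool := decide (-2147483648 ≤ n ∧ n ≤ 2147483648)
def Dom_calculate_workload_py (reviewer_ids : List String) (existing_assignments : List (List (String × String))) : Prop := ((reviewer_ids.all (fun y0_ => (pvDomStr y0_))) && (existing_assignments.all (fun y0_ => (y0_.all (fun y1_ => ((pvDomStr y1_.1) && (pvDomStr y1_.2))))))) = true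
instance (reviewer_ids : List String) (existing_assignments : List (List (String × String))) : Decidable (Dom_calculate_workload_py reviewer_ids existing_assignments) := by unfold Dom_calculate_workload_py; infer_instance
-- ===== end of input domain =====

-- B replaces A's init-then-increment accumulator loops with a dict comprehension that
-- counts matching assignments per reviewer id directly (simpler; not faster).

-- ===== PORT A =====
-- workload = {rid: 0 for rid in reviewer_ids}; then for each assignment, if its
-- "reviewer_id" is a key of workload, increment that entry; return workload.
def calculate_workload_py (reviewer_ids : List String) (existing_assignments : List (List (String × String))) : List (String × Int) :=
  let workload0 : PySem.Dict String Int :=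
    reviewer_ids.foldl (fun d rid => d.insert rid 0) PySem.Dict.empty
  let workload : PySem.Dict String Int :=
    existing_assignments.foldl (fun d assignment =>
      match (PySem.Dict.ofList assignment).get? "reviewer_id" with
      | some reviewer_id => if d.contains reviewer_id then d.modify reviewer_id 0 (· + 1) else d
      | none => d) workload0
  workload.items

-- ===== PORT B =====
-- {rid: sum(1 for a in existing_assignments if a.get("reviewer_id") == rid) for rid in reviewer_ids}
def calculate_workload_py_alt (reviewer_ids : List String) (existing_assignments : List (List (String × String))) : List (String × Int) :=
  (reviewer_ids.foldl (fun d rid =>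
      d.insert rid
        (existing_assignments.foldl (fun s a =>
          if (PySem.Dict.ofList a).get? "reviewer_id" == some rid then s + 1 else s) (0 : Int)))
    (PySem.Dict.empty : PySem.Dict String Int)).items

-- ===== PRECONDITION & SPEC =====
def Spec_calculate_workload_py (reviewer_ids : List String) (existing_assignments : List (List (String × String))) (out : List (String × Int)) : Prop := out = calculate_workload_py_alt reviewer_ids existing_assignments
instance (reviewer_ids : List String) (existing_assignments : List (List (String × String))) (out : List (String × Int)) : Decidable (Spec_calculate_workload_py reviewer_ids existing_assignments out) := by unfold Spec_calculate_workload_py; infer_instance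

-- ===== CLAIM (what is proved, stated in full; the proofs are below) =====
def Claim_equal_calculate_workload_py : Prop := ∀ (reviewer_ids : List String) (existing_assignments : List (List (String × String))), Dom_calculate_workload_py reviewer_ids existing_assignments → Spec_calculate_workload_py reviewer_ids existing_assignments (calculate_workload_py reviewer_ids existing_assignments)

-- ===== LEMMAS AND PROOFS =====

-- A's second loop leaves the key set unchanged
theorem keysA (l : List (List (String × String))) (d : PySem.Dict String Int) :
    (l.foldl (fun d a =>
      match (PySem.Dict.ofList a).get? "reviewer_id" with
      | some r => if d.contains r then d.modify r 0 (· + 1) else d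
      | none => d) d).keys = d.keys := by
  induction l generalizing d with
  | nil => rfl
  | cons a t ih =>
    simp only [List.foldl_cons]
    rw [ih]
    cases h : (PySem.Dict.ofList a).get? "reviewer_id" with
    | none => rfl
    | some r =>
      simp only []
      by_cases hc : d.contains r = true
      · simp only [hc, if_true, PySem.Dict.keys_modify,
          PySem.Dict.keys_insert_of_contains d _ hc]
      · simp [hc]

-- A's second loop: value at k gains the count of assignments keyed to k iff k is a key
theorem getDA (l : List (List (String × String))) (d : PySem.Dict String Int) (k : String) :
    (l.foldl (fun d a =>
      match (PySem.Dict.ofList a).get? "reviewer_id" with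
      | some r => if d.contains r then d.modify r 0 (· + 1) else d
      | none => d) d).getD k 0
    = d.getD k 0 + (if d.contains k then ((l.countP (fun a => (PySem.Dict.ofList a).get? "reviewer_id" == some k)) : Int) else 0) := by
  induction l generalizing d with
  | nil => simp
  | cons a t ih =>
    simp only [List.foldl_cons, List.countP_cons]
    rw [ih]
    cases h : (PySem.Dict.ofList a).get? "reviewer_id" with
    | none =>
      simp
    | some r =>
      simp only []
      by_cases hc : d.contains r = true
      · simp only [hc, if_true]
        have hck : ∀ k', (d.modify r 0 (· + 1)).contains k' = d.contains k' := by
          intro k'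
          rw [PySem.Dict.contains_modify]
          by_cases hkr : k' = r
          · simp [hkr, hc]
          · simp [hkr]
        rw [hck, PySem.Dict.getD_modify]
        by_cases hkr : k = r
        · subst hkr
          simp only [hc, if_true, beq_self_eq_true]
          push_cast
          ring
        · rw [if_neg hkr]
          have : (some r == some k) = false := by
            simp only [beq_eq_false_iff_ne, ne_eq, Option.some.injEq]
            exact fun hh => hkr hh.symm
          simp only [this]
          by_cases hck2 : d.contains k = true
          · simp only [hck2, if_true]
            push_cast
            ring
          · simp [hck2]
      · simp only [if_neg (by simp [hc] : ¬ d.contains r = true)]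
        by_cases hkr : k = r
        · subst hkr
          simp [hc]
        · have : ((PySem.Dict.ofList a).get? "reviewer_id" == some k) = false := by
            rw [h]
            simp only [beq_eq_false_iff_ne, ne_eq, Option.some.injEq]
            exact fun hh => hkr hh.symm
          simp [show ¬ r = k from fun hh => hkr hh.symm]

-- A's first loop: every stored value is 0
theorem getD0 (ids : List String) (d : PySem.Dict String Int) (k : String)
    (h : d.getD k 0 = 0) :
    (ids.foldl (fun d rid => d.insert rid (0 : Int)) d).getD k 0 = 0 := by
  induction ids generalizing d with
  | nil => simpa using h
  | cons i t ih =>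
    simp only [List.foldl_cons]
    apply ih
    rw [PySem.Dict.getD_insert]
    split
    · rfl
    · exact h

-- B's loop: value at k is cnt k whenever k ∈ ids, else untouched
theorem getDB (ids : List String) (cnt : String → Int) (d : PySem.Dict String Int) (k : String) :
    (ids.foldl (fun d rid => d.insert rid (cnt rid)) d).getD k 0
    = if k ∈ ids then cnt k else d.getD k 0 := by
  induction ids generalizing d with
  | nil => simp
  | cons i t ih =>
    simp only [List.foldl_cons]
    rw [ih, PySem.Dict.getD_insert]
    by_cases hm : k ∈ t
    · simp [hm]
    · by_cases hk : k = i
      · simp [hk]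
      · simp [hk, hm]

-- ===== VERDICT (by name: the statement is the Claim_ definition above) =====
theorem calculate_workload_py_spec : Claim_equal_calculate_workload_py := by
  intro ids assigns _
  unfold Spec_calculate_workload_py calculate_workload_py calculate_workload_py_alt
  simp only []
  set cnt : String → Int := fun rid =>
    assigns.foldl (fun s a =>
      if (PySem.Dict.ofList a).get? "reviewer_id" == some rid then s + 1 else s) 0 with hcnt
  -- names for the three dicts
  set d0 : PySem.Dict String Int := ids.foldl (fun d rid => d.insert rid 0) PySem.Dict.empty with hd0
  set dA : PySem.Dict String Int := assigns.foldl (fun d a =>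
      match (PySem.Dict.ofList a).get? "reviewer_id" with
      | some r => if d.contains r then d.modify r 0 (· + 1) else d
      | none => d) d0 with hdA
  set dB : PySem.Dict String Int := ids.foldl (fun d rid => d.insert rid (cnt rid)) PySem.Dict.empty with hdB
  have hk0 : d0.keys = PySem.Set.update (PySem.Dict.empty : PySem.Dict String Int).keys ids :=
    PySem.Dict.keys_foldl_insert ids _ _
  have hnd0 : d0.keys.Nodup :=
    PySem.Dict.nodup_keys_foldl_insert ids _ _ (by simp)
  have hkA : dA.keys = d0.keys := by
    rw [hdA]
    exact keysA assigns d0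
  have hndA : dA.keys.Nodup := hkA ▸ hnd0
  have hkB : dB.keys = d0.keys := by
    rw [hdB, PySem.Dict.keys_foldl_insert, hk0]
  have hndB : dB.keys.Nodup := hkB ▸ hnd0
  rw [PySem.Dict.items_eq_map_keys dA hndA 0, PySem.Dict.items_eq_map_keys dB hndB 0, hkA, hkB]
  apply List.map_congr_left
  intro k hkmem
  have hc0 : d0.contains k = true := by
    rw [PySem.Dict.contains_eq_decide_mem_keys]
    simp [hkmem]
  have hkmemids : k ∈ ids := by
    have h2 := (PySem.Set.mem_update (PySem.Dict.empty : PySem.Dict String Int).keys ids k).mp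
      (by rwa [← hk0])
    simpa [PySem.Dict.keys_empty] using h2
  have hA : dA.getD k 0 = (assigns.countP (fun a => (PySem.Dict.ofList a).get? "reviewer_id" == some k) : Int) := by
    rw [hdA, getDA, getD0 ids _ k (by simp [PySem.Dict.getD_empty]), hc0]
    simp
  have hB : dB.getD k 0 = cnt k := by
    rw [hdB, getDB]
    simp [hkmemids]
  have hcntk : cnt k = (assigns.countP (fun a => (PySem.Dict.ofList a).get? "reviewer_id" == some k) : Int) := by
    rw [hcnt]
    simpa using PySem.List.foldl_count_if
      (fun a => (PySem.Dict.ofList a).get? "reviewer_id" == some k) assigns 0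
  simp [hA, hB, hcntk]
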